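-- pv_equiv track=rewrite | github.com/heyifan142857/SubBake | subbake/prompts.py | select_relevant_glossary
-- ===== SOURCE A (Python) =====
-- def select_relevant_glossary(
--     glossary: dict[str, str],
--     texts: list[str],
--     limit: int = 24,
-- ) -> dict[str, str]:
--     if not glossary or not texts:
--         return {}
--
--     haystack = "\n".join(texts).casefold()
--     matched: dict[str, str] = {}
--     for source, target in glossary.items():
--         if source.casefold() in haystack or target.casefold() in haystack:
--             matched[source] = target
--             if len(matched) >= limit:
--                 break
--     return matched
-- ===== SOURCE B (Python) =====
-- def select_relevant_glossary(glossary, texts, limit=24):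
--     # Index the haystack once: a set of its length-L substrings per needed
--     # length, so each glossary entry is decided by two hash lookups.
--     if limit <= 0 or not texts:
--         return {}
--     hay = "\n".join(texts).casefold()
--     n = len(hay)
--     lengths = {len(p.casefold()) for pair in glossary.items() for p in pair}
--     grams = {L: {hay[j:j + L] for j in range(n - L + 1)} for L in lengths}
--     hits = [(s, t) for s, t in glossary.items()
--             if s.casefold() in grams[len(s.casefold())] or t.casefold() in grams[len(t.casefold())]]
--     return dict(hits[:limit])
-- ===== Notes on version B (the rewrite author's own statement) =====
-- stated objective: faster
-- what changed: Instead of running a substring scan over the haystack for every glossary entry with an early-break dict loop, B indexes the casefolded haystack once into per-length sets of its substrings and decides each entry by two set lookups, then truncates the matches to the limit (per-entry O(H) scans replaced by O(1) lookups); Pre_ also excludes association lists with duplicate keys, which do not represent a Python dict.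
-- intended difference: On a non-positive limit with non-empty texts and at least one matching entry, A returns the first matching pair (it checks the limit only after inserting) while B returns no entries, the intended meaning of 'at most limit entries'. — e.g. on select_relevant_glossary([("a", "b")], ["a"], 0): A returns [("a", "b")], B returns []
import Mathlib
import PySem

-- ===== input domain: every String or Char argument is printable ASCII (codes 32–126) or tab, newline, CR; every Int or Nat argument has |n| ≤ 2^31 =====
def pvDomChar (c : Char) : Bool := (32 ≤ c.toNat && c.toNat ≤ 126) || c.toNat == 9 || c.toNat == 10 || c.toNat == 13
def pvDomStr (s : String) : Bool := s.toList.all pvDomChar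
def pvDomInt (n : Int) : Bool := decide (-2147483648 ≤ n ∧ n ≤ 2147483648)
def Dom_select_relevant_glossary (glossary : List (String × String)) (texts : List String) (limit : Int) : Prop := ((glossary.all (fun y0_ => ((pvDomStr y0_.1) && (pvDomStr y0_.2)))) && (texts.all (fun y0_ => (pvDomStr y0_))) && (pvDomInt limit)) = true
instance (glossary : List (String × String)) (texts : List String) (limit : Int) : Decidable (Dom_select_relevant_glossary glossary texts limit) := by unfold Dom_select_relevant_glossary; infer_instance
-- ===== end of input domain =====

-- B indexes the casefolded haystack once into per-length substring sets and decides each glossary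
-- entry by set membership (an alternative algorithm: no per-entry substring scan); str.casefold()
-- is ported as PySem.Str.lower — exact on the ASCII domain Dom_.

-- ===== PORT A =====
-- the 'for source, target in glossary.items(): …' loop with the early break
def pvALoop (hay : String) (limit : Int) : List (String × String) → PySem.Dict String String → PySem.Dict String String
  | [], m => m
  | (s, t) :: rest, m =>
    if PySem.Str.isIn (PySem.Str.lower s) hay || PySem.Str.isIn (PySem.Str.lower t) hay then
      -- matched[source] = target; if len(matched) >= limit: break
      if limit ≤ ((m.insert s t).size : Int) then m.insert s t
      else pvALoop hay limit rest (m.insert s t)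
    else pvALoop hay limit rest m

def select_relevant_glossary (glossary : List (String × String)) (texts : List String) (limit : Int) : List (String × String) :=
  if glossary = [] ∨ texts = [] then []
  else
    let haystack := PySem.Str.lower (PySem.Str.join "\n" texts)
    (pvALoop haystack limit glossary PySem.Dict.empty).items

-- ===== PORT B =====
-- {hay[j:j+L] for j in range(n - L + 1)}
def pvGram (hay : String) (L : Int) : PySem.Set String :=
  PySem.Set.ofList ((PySem.List.pyRange 0 (PySem.Str.len hay - L + 1)).map
    (fun j => PySem.Str.slice hay (some j) (some (j + L))))

-- grams = {L: {hay[j:j+L] for j in range(n - L + 1)} for L in lengths}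
def pvGramsDict (hay : String) (lengths : List Int) : PySem.Dict Int (PySem.Set String) :=
  lengths.foldl (fun d L => d.insert L (pvGram hay L)) PySem.Dict.empty

def select_relevant_glossary_alt (glossary : List (String × String)) (texts : List String) (limit : Int) : List (String × String) :=
  if limit ≤ 0 ∨ texts = [] then []
  else
    let hay := PySem.Str.lower (PySem.Str.join "\n" texts)
    let lengths : PySem.Set Int :=
      PySem.Set.ofList (glossary.flatMap (fun p =>
        [PySem.Str.len (PySem.Str.lower p.1), PySem.Str.len (PySem.Str.lower p.2)]))
    let grams := pvGramsDict hay lengths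
    -- the length key is always present, so Python's grams[len(p)] is this getD
    let hits := glossary.filter (fun p =>
      (grams.getD (PySem.Str.len (PySem.Str.lower p.1)) PySem.Set.empty).contains (PySem.Str.lower p.1) ||
      (grams.getD (PySem.Str.len (PySem.Str.lower p.2)) PySem.Set.empty).contains (PySem.Str.lower p.2))
    (PySem.Dict.ofList (PySem.List.slice hits none (some limit))).items

-- ===== PRECONDITION & SPEC =====
-- Pre_ excludes association lists with duplicate keys: they do not represent a Python dict
-- (A's glossary parameter is a dict, whose items() can never repeat a key).
def Pre_select_relevant_glossary (glossary : List (String × String)) (_texts : List String) (_limit : Int) : Prop :=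
  (glossary.map Prod.fst).Nodup
instance (glossary : List (String × String)) (texts : List String) (limit : Int) : Decidable (Pre_select_relevant_glossary glossary texts limit) := by unfold Pre_select_relevant_glossary; infer_instance

def pvWitness_select_relevant_glossary : (List (String × String)) × List String × Int :=
  ([("cat", "Katze"), ("dog", "Hund")], ["The CAT sat."], 24)

-- On a non-positive limit with a matching entry and non-empty texts, A returns the first matching
-- pair (it checks the limit only after inserting) while B returns no entries, the intended
-- meaning of "at most `limit` entries".
def D_select_relevant_glossary (glossary : List (String × String)) (texts : List String) (limit : Int) : Prop :=
  limit ≤ 0 ∧ texts ≠ [] ∧ ∃ p ∈ glossary,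
    (PySem.Str.isIn (PySem.Str.lower p.1) (PySem.Str.lower (PySem.Str.join "\n" texts)) ||
     PySem.Str.isIn (PySem.Str.lower p.2) (PySem.Str.lower (PySem.Str.join "\n" texts))) = true
instance (glossary : List (String × String)) (texts : List String) (limit : Int) : Decidable (D_select_relevant_glossary glossary texts limit) := by unfold D_select_relevant_glossary; infer_instance

def Spec_select_relevant_glossary (glossary : List (String × String)) (texts : List String) (limit : Int) (out : List (String × String)) : Prop := ¬ D_select_relevant_glossary glossary texts limit → out = select_relevant_glossary_alt glossary texts limit
instance (glossary : List (String × String)) (texts : List String) (limit : Int) (out : List (String × String)) : Decidable (Spec_select_relevant_glossary glossary texts limit out) := by unfold Spec_select_relevant_glossary; infer_instance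

def pvDiffWitness_select_relevant_glossary : (List (String × String)) × List String × Int :=
  ([("a", "b")], ["a"], 0)
def pvDiffWitnessOut_select_relevant_glossary : (List (String × String)) × (List (String × String)) :=
  ([("a", "b")], [])

-- ===== CLAIM (what is proved, stated in full; the proofs are below) =====
def Claim_unchanged_select_relevant_glossary : Prop := ∀ (glossary : List (String × String)) (texts : List String) (limit : Int), Dom_select_relevant_glossary glossary texts limit → Pre_select_relevant_glossary glossary texts limit → Spec_select_relevant_glossary glossary texts limit (select_relevant_glossary glossary texts limit)
def Claim_changed_select_relevant_glossary : Prop := Dom_select_relevant_glossary (pvDiffWitness_select_relevant_glossary.1) (pvDiffWitness_select_relevant_glossary.2.1) (pvDiffWitness_select_relevant_glossary.2.2) ∧ Pre_select_relevant_glossary (pvDiffWitness_select_relevant_glossary.1) (pvDiffWitness_select_relevant_glossary.2.1) (pvDiffWitness_select_relevant_glossary.2.2) ∧ D_select_relevant_glossary (pvDiffWitness_select_relevant_glossary.1) (pvDiffWitness_select_relevant_glossary.2.1) (pvDiffWitness_select_relevant_glossary.2.2) ∧ select_relevant_glossary (pvDiffWitness_select_relevant_glossary.1) (pvDiffWitness_select_relevant_glossary.2.1)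 (pvDiffWitness_select_relevant_glossary.2.2) = pvDiffWitnessOut_select_relevant_glossary.1 ∧ select_relevant_glossary_alt (pvDiffWitness_select_relevant_glossary.1) (pvDiffWitness_select_relevant_glossary.2.1) (pvDiffWitness_select_relevant_glossary.2.2) = pvDiffWitnessOut_select_relevant_glossary.2 ∧ pvDiffWitnessOut_select_relevant_glossary.1 ≠ pvDiffWitnessOut_select_relevant_glossary.2
def Claim_exact_select_relevant_glossary : Prop := ∀ (glossary : List (String × String)) (texts : List String) (limit : Int), Dom_select_relevant_glossary glossary texts limit → Pre_select_relevant_glossary glossary texts limit → D_select_relevant_glossary glossary texts limit → select_relevant_glossary glossary texts limit ≠ select_relevant_glossary_alt glossary texts limit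

-- ===== LEMMAS AND PROOFS =====

-- A's loop invariant: from a dict whose keys are disjoint from the (pairwise distinct) remaining
-- glossary keys, the loop appends the matching pairs, stopping after max(limit - |m|, 1) of them.
theorem pvALoop_items (hay : String) (limit : Int) (gs : List (String × String))
    (m : PySem.Dict String String)
    (hnd : (gs.map Prod.fst).Nodup)
    (hfresh : ∀ p ∈ gs, m.contains p.1 = false) :
    (pvALoop hay limit gs m).items =
      m.items ++ (gs.filter (fun p => PySem.Str.isIn (PySem.Str.lower p.1) hay || PySem.Str.isIn (PySem.Str.lower p.2) hay)).take
        (max (limit - m.items.length) 1).toNat := by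
  induction gs generalizing m with
  | nil => simp [pvALoop]
  | cons hd tl ih =>
    obtain ⟨s, t⟩ := hd
    have hs : m.contains s = false := hfresh (s, t) (by simp)
    have hitems : (m.insert s t).items = m.items ++ [(s, t)] :=
      PySem.Dict.items_insert_of_not_contains m t hs
    have hsz : ((m.insert s t).size : Int) = (m.items.length : Int) + 1 := by
      simp [PySem.Dict.size, hitems]
    simp only [List.map_cons, List.nodup_cons] at hnd
    by_cases hpred : (PySem.Str.isIn (PySem.Str.lower s) hay || PySem.Str.isIn (PySem.Str.lower t) hay) = true
    · rw [List.filter_cons_of_pos (by simpa using hpred)]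
      by_cases hbrk : limit ≤ ((m.insert s t).size : Int)
      · simp only [pvALoop]
        rw [if_pos hpred, if_pos hbrk, hitems]
        have hmax : (max (limit - (m.items.length : Int)) 1).toNat = 1 := by omega
        rw [hmax, List.take_succ_cons, List.take_zero]
      · have hfresh' : ∀ p ∈ tl, (m.insert s t).contains p.1 = false := by
          intro p hp
          have h1 : m.contains p.1 = false := hfresh p (by simp [hp])
          have h2 : p.1 ≠ s := fun hcon => hnd.1 (List.mem_map.mpr ⟨p, hp, hcon⟩)
          rw [PySem.Dict.contains_insert]
          simp [h1, h2]
        simp only [pvALoop]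
        rw [if_pos hpred, if_neg hbrk, ih (m.insert s t) hnd.2 hfresh', hitems]
        have hlen : (((m.items ++ [(s, t)]).length : Int)) = (m.items.length : Int) + 1 := by
          simp
        rw [List.append_assoc]
        congr 1
        rw [hlen]
        have h2 : (2 : Int) ≤ limit - (m.items.length : Int) := by omega
        have e1 : (max (limit - ((m.items.length : Int) + 1)) 1).toNat + 1
            = (max (limit - (m.items.length : Int)) 1).toNat := by omega
        rw [← e1, List.take_succ_cons, List.singleton_append]
    · rw [List.filter_cons_of_neg (by simpa using hpred)]
      simp only [pvALoop]
      rw [if_neg hpred]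
      exact ih m hnd.2 (fun p hp => hfresh p (by simp [hp]))

-- lookup in a dict built by inserting, at each key, a value that is a function of the key
theorem get?_foldl_insert_fn {κ ν : Type} [BEq κ] [LawfulBEq κ] [DecidableEq κ]
    (f : κ → ν) (Ls : List κ) (d : PySem.Dict κ ν) (L : κ)
    (hd : d.get? L = some (f L) ∨ d.get? L = none) :
    (Ls.foldl (fun d k => d.insert k (f k)) d).get? L
      = if L ∈ Ls then some (f L) else d.get? L := by
  induction Ls generalizing d with
  | nil => simp
  | cons k Ls ih =>
    simp only [List.foldl_cons]
    have hd' : (d.insert k (f k)).get? L = some (f L) ∨ (d.insert k (f k)).get? L = none := by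
      rw [PySem.Dict.get?_insert]
      by_cases hk : L = k
      · subst hk; simp
      · simpa [hk] using hd
    rw [ih _ hd', PySem.Dict.get?_insert]
    by_cases hmem : L ∈ Ls
    · simp [hmem]
    · by_cases hk : L = k <;> simp [hmem, hk]

theorem getD_pvGramsDict (hay : String) (Ls : List Int) (L : Int) (hL : L ∈ Ls) :
    (pvGramsDict hay Ls).getD L PySem.Set.empty = pvGram hay L := by
  unfold pvGramsDict
  rw [PySem.Dict.getD_eq_get?_getD,
    get?_foldl_insert_fn (pvGram hay) Ls PySem.Dict.empty L (Or.inr (PySem.Dict.get?_empty L))]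
  simp [hL]

-- membership in the slice list is exactly Python's substring test
theorem mem_gram_iff (h p : List Char) :
    (∃ j : Int, j ∈ PySem.List.pyRange 0 ((h.length : Int) - p.length + 1) ∧
        p = PySem.List.slice h (some j) (some (j + (p.length : Int))))
      ↔ PySem.Chars.isIn p h = true := by
  rw [← PySem.Chars.exists_prefix_drop_iff_isIn]
  constructor
  · rintro ⟨j, hj, hslice⟩
    rw [PySem.List.mem_pyRange_one] at hj
    refine ⟨j.toNat, ?_⟩
    have h0 : (0 : Int) ≤ j := hj.1
    have h1 : (0 : Int) ≤ j + p.length := by omega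
    rw [PySem.List.slice_toNat h h0 h1] at hslice
    have hnat : (j + (p.length : Int)).toNat - (j : Int).toNat = p.length := by omega
    rw [hnat] at hslice
    rw [hslice]
    exact List.take_prefix _ _
  · rintro ⟨j, hpre⟩
    by_cases hp : p = []
    · subst hp
      refine ⟨0, ?_, ?_⟩
      · rw [PySem.List.mem_pyRange_one]
        refine ⟨le_refl 0, ?_⟩
        simp
      · simp [PySem.List.slice_toNat h le_rfl le_rfl]
    · have hplen : 0 < p.length := List.length_pos_iff.mpr hp
      have hlen : p.length ≤ h.length - j := by
        have := hpre.length_le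
        simpa [List.length_drop] using this
      have hjle : j + p.length ≤ h.length := by omega
      refine ⟨(j : Int), ?_, ?_⟩
      · rw [PySem.List.mem_pyRange_one]
        constructor <;> omega
      · have h0 : (0 : Int) ≤ (j : Int) := by omega
        have h1 : (0 : Int) ≤ (j : Int) + p.length := by omega
        rw [PySem.List.slice_toNat h h0 h1]
        have hnat : ((j : Int) + (p.length : Int)).toNat - ((j : Int)).toNat = p.length := by omega
        rw [hnat]
        have : (j : Int).toNat = j := by omega
        rw [this]
        exact List.prefix_iff_eq_take.mp hpre
      
theorem contains_pvGram_eq (hay p : String) :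
    (pvGram hay (PySem.Str.len p)).contains p = PySem.Str.isIn p hay := by
  rw [Bool.eq_iff_iff]
  rw [PySem.Set.contains_iff, PySem.Str.isIn_eq]
  unfold pvGram
  rw [PySem.Set.mem_ofList, List.mem_map]
  rw [← mem_gram_iff hay.toList p.toList]
  constructor
  · rintro ⟨j, hj, hsl⟩
    refine ⟨j, ?_, ?_⟩
    · simpa [PySem.Str.len_eq] using hj
    · have := congrArg String.toList hsl
      simp only [PySem.Str.toList_slice, PySem.Chars.slice_eq_listSlice, PySem.Str.len_eq] at this
      exact this.symm
  · rintro ⟨j, hj, hsl⟩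
    refine ⟨j, ?_, ?_⟩
    · simpa [PySem.Str.len_eq] using hj
    · apply String.toList_inj.mp
      simp only [PySem.Str.toList_slice, PySem.Chars.slice_eq_listSlice, PySem.Str.len_eq]
      exact hsl.symm

-- B's per-entry test equals A's substring test, for entries of the glossary
theorem predB_eq_predA (glossary : List (String × String)) (hay : String)
    (p : String × String) (hp : p ∈ glossary) :
    (((pvGramsDict hay (PySem.Set.ofList (glossary.flatMap (fun q =>
        [PySem.Str.len (PySem.Str.lower q.1), PySem.Str.len (PySem.Str.lower q.2)])))).getD
          (PySem.Str.len (PySem.Str.lower p.1)) PySem.Set.empty).contains (PySem.Str.lower p.1) ||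
     ((pvGramsDict hay (PySem.Set.ofList (glossary.flatMap (fun q =>
        [PySem.Str.len (PySem.Str.lower q.1), PySem.Str.len (PySem.Str.lower q.2)])))).getD
          (PySem.Str.len (PySem.Str.lower p.2)) PySem.Set.empty).contains (PySem.Str.lower p.2))
    = (PySem.Str.isIn (PySem.Str.lower p.1) hay || PySem.Str.isIn (PySem.Str.lower p.2) hay) := by
  have h1 : PySem.Str.len (PySem.Str.lower p.1)
      ∈ (PySem.Set.ofList (glossary.flatMap (fun q =>
        [PySem.Str.len (PySem.Str.lower q.1), PySem.Str.len (PySem.Str.lower q.2)])) : List Int) := by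
    rw [PySem.Set.mem_ofList, List.mem_flatMap]
    exact ⟨p, hp, by simp⟩
  have h2 : PySem.Str.len (PySem.Str.lower p.2)
      ∈ (PySem.Set.ofList (glossary.flatMap (fun q =>
        [PySem.Str.len (PySem.Str.lower q.1), PySem.Str.len (PySem.Str.lower q.2)])) : List Int) := by
    rw [PySem.Set.mem_ofList, List.mem_flatMap]
    exact ⟨p, hp, by simp⟩
  rw [getD_pvGramsDict _ _ _ h1, getD_pvGramsDict _ _ _ h2,
    contains_pvGram_eq, contains_pvGram_eq]

theorem dict_ofList_items (l : List (String × String)) (h : (l.map Prod.fst).Nodup) :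
    (PySem.Dict.ofList l).items = l := by
  have := PySem.Dict.items_foldl_insert_fresh l Prod.fst Prod.snd PySem.Dict.empty
    (fun a _ => PySem.Dict.contains_empty a.1) h
  simpa [PySem.Dict.ofList, PySem.Dict.update] using this

-- ===== VERDICT (by name: the statements are the Claim_ definitions above) =====
theorem select_relevant_glossary_spec : Claim_unchanged_select_relevant_glossary := by
  intro glossary texts limit _ hpre hnD
  by_cases ht : texts = []
  · simp [select_relevant_glossary, select_relevant_glossary_alt, ht]
  · by_cases hlim : limit ≤ 0
    · -- ¬D_ means nothing matches: both sides are empty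
      have hnom : ∀ p ∈ glossary,
          (PySem.Str.isIn (PySem.Str.lower p.1) (PySem.Str.lower (PySem.Str.join "\n" texts)) ||
           PySem.Str.isIn (PySem.Str.lower p.2) (PySem.Str.lower (PySem.Str.join "\n" texts))) = false := by
        intro p hp
        rcases Bool.eq_false_or_eq_true
          (PySem.Str.isIn (PySem.Str.lower p.1) (PySem.Str.lower (PySem.Str.join "\n" texts)) ||
           PySem.Str.isIn (PySem.Str.lower p.2) (PySem.Str.lower (PySem.Str.join "\n" texts))) with h | h
        · exact absurd ⟨hlim, ht, p, hp, h⟩ hnD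
        · exact h
      rw [select_relevant_glossary_alt, if_pos (Or.inl hlim)]
      by_cases hg : glossary = []
      · simp [select_relevant_glossary, hg]
      · rw [select_relevant_glossary, if_neg (by simp [hg, ht])]
        rw [pvALoop_items _ limit glossary PySem.Dict.empty hpre
              (fun p _ => PySem.Dict.contains_empty p.1)]
        rw [List.filter_eq_nil_iff.mpr (by intro p hp; rw [hnom p hp]; simp)]
        simp
        rfl
    · -- limit ≥ 1
      push_neg at hlim
      by_cases hg : glossary = []
      · subst hg
        rw [select_relevant_glossary, if_pos (Or.inl rfl)]
        rw [select_relevant_glossary_alt, if_neg (by simp [ht]; omega)]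
        simp only [List.filter_nil]
        rw [PySem.List.slice_to _ (by omega : (0:Int) ≤ limit)]
        simp [dict_ofList_items [] (by simp)]
      · rw [select_relevant_glossary, if_neg (by simp [hg, ht])]
        rw [select_relevant_glossary_alt, if_neg (by simp [ht]; omega)]
        simp only []
        rw [pvALoop_items _ limit glossary PySem.Dict.empty hpre
              (fun p _ => PySem.Dict.contains_empty p.1)]
        rw [List.filter_congr (fun p hp => predB_eq_predA glossary _ p hp)]
        rw [PySem.List.slice_to _ (by omega : (0:Int) ≤ limit)]
        have hnodup : ((List.take limit.toNat (glossary.filter (fun p =>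
            PySem.Str.isIn (PySem.Str.lower p.1) (PySem.Str.lower (PySem.Str.join "\n" texts)) ||
            PySem.Str.isIn (PySem.Str.lower p.2) (PySem.Str.lower (PySem.Str.join "\n" texts))))).map Prod.fst).Nodup :=
          hpre.sublist (List.Sublist.map Prod.fst
            ((List.take_sublist _ _).trans List.filter_sublist))
        rw [dict_ofList_items _ hnodup]
        have : (max (limit - ((PySem.Dict.empty : PySem.Dict String String).items.length : Int)) 1).toNat = limit.toNat := by
          simp [PySem.Dict.empty, PySem.Dict.items]; omega
        rw [this]
        simp [PySem.Dict.empty, PySem.Dict.items]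

theorem select_relevant_glossary_changed : Claim_changed_select_relevant_glossary := by
  unfold Claim_changed_select_relevant_glossary; decide

theorem select_relevant_glossary_tight : Claim_exact_select_relevant_glossary := by
  intro glossary texts limit _ hpre hD
  obtain ⟨hlim, ht, p, hp, hmatch⟩ := hD
  have hg : glossary ≠ [] := by intro h; subst h; exact absurd hp (List.not_mem_nil)
  rw [select_relevant_glossary_alt, if_pos (Or.inl hlim)]
  rw [select_relevant_glossary, if_neg (by simp [hg, ht])]
  rw [pvALoop_items _ limit glossary PySem.Dict.empty hpre
        (fun q _ => PySem.Dict.contains_empty q.1)]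
  have hmax : (max (limit - ((PySem.Dict.empty : PySem.Dict String String).items.length : Int)) 1).toNat = 1 := by
    simp [PySem.Dict.empty, PySem.Dict.items]; omega
  rw [hmax]
  have hmem : p ∈ glossary.filter (fun q =>
      PySem.Str.isIn (PySem.Str.lower q.1) (PySem.Str.lower (PySem.Str.join "\n" texts)) ||
      PySem.Str.isIn (PySem.Str.lower q.2) (PySem.Str.lower (PySem.Str.join "\n" texts))) :=
    List.mem_filter.mpr ⟨hp, hmatch⟩
  cases hfil : glossary.filter (fun q =>
      PySem.Str.isIn (PySem.Str.lower q.1) (PySem.Str.lower (PySem.Str.join "\n" texts)) ||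
      PySem.Str.isIn (PySem.Str.lower q.2) (PySem.Str.lower (PySem.Str.join "\n" texts))) with
  | nil => rw [hfil] at hmem; exact absurd hmem (List.not_mem_nil)
  | cons a l => simp [PySem.Dict.empty, PySem.Dict.items]
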